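-- pv_equiv track=rewrite | github.com/MatthiasLienhard/isotools | isotools/_utils.py | junctions_from_cigar
-- ===== SOURCE A (Python) =====
-- def junctions_from_cigar(cigartuples, offset):
--     'returns the exon positions'
--     exons = list([[offset, offset]])
--     for cigar in cigartuples:
--         if cigar[0] == 3:  # N ->  Splice junction
--             pos = exons[-1][1]+cigar[1]
--             if exons[-1][0]==exons[-1][1]:
--                 # delete zero length exons
--                 # (may occur if insertion within intron, e.g. 10M100N10I100N10M)
--                 del exons[-1]
--             exons.append([pos, pos])
--         elif cigar[0] in (0, 2, 7, 8):  # MD=X -> move forward on reference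
--             exons[-1][1] += cigar[1]
--     if exons[-1][0]==exons[-1][1]: #delete 0 length exons at the end
--         del exons[-1]
--     return exons
-- ===== SOURCE B (Python) =====
-- def junctions_from_cigar(cigartuples, offset):
--     'returns the exon positions'
--     # stage 1: keep only the reference-consuming ops
--     ops = [(op, ln) for op, ln in cigartuples if op in (0, 2, 3, 7, 8)]
--     # stage 2: cumulative reference positions before/after each kept op
--     pos = [offset]
--     for _, ln in ops:
--         pos.append(pos[-1] + ln)
--     # stage 3: junction boundaries (position before / after each N op)
--     bounds = [(p0, p1) for (op, _), p0, p1 in zip(ops, pos, pos[1:]) if op == 3]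
--     # stage 4: pair candidate exon starts with ends, dropping empty exons
--     starts = [offset] + [p1 for _, p1 in bounds]
--     ends = [p0 for p0, _ in bounds] + [pos[-1]]
--     return [[s, e] for s, e in zip(starts, ends) if s != e]
-- ===== Notes on version B (the rewrite author's own statement) =====
-- stated objective: alternative
-- what changed: Replaces A's single stateful pass that mutates/deletes the last interval of a growing list with a staged pipeline: filter reference-consuming ops, build the cumulative-position list, extract junction boundaries at N ops, then zip candidate starts with ends and drop empty exons.
import Mathlib
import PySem

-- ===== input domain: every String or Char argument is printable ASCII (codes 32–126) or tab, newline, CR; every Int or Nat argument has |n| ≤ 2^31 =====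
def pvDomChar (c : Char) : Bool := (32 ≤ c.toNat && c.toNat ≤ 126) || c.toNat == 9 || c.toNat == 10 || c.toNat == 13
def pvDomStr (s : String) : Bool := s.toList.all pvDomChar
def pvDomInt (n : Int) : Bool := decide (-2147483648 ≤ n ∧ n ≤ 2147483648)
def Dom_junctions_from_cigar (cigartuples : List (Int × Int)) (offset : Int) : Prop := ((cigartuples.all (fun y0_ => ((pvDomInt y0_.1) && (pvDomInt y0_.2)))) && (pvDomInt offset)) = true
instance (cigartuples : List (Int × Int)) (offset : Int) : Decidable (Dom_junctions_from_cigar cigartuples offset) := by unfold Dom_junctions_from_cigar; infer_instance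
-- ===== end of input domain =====

-- B replaces A's stateful pass mutating the last interval of a growing list by a staged pipeline
-- (filter ops, cumulative positions, junction boundaries, zip starts/ends) — an alternative of the same O(n) cost.

-- ===== PORT A =====
-- A's loop body: exons is the growing list of intervals; only its last element is read/edited.
def jfcLast (exons : List (List Int)) : List Int := (exons.getLast?).getD [0, 0]  -- exons is never empty in A

def jfc_step (exons : List (List Int)) (cigar : Int × Int) : List (List Int) :=
  let s := (PySem.List.pyGet? (jfcLast exons) 0).getD 0
  let e := (PySem.List.pyGet? (jfcLast exons) 1).getD 0
  if cigar.1 = 3 then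
    let pos := e + cigar.2
    (if s = e then exons.dropLast else exons) ++ [[pos, pos]]
  else if cigar.1 = 0 ∨ cigar.1 = 2 ∨ cigar.1 = 7 ∨ cigar.1 = 8 then
    exons.dropLast ++ [[s, e + cigar.2]]
  else exons

-- A's final step: delete the last exon if zero-length
def jfc_trim (exons : List (List Int)) : List (List Int) :=
  let s := (PySem.List.pyGet? (jfcLast exons) 0).getD 0
  let e := (PySem.List.pyGet? (jfcLast exons) 1).getD 0
  if s = e then exons.dropLast else exons

def junctions_from_cigar (cigartuples : List (Int × Int)) (offset : Int) : List (List Int) :=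
  jfc_trim (cigartuples.foldl jfc_step [[offset, offset]])

-- ===== PORT B =====
-- B: staged pipeline from Source B — filter, cumulative positions, boundaries at N ops, zip starts/ends.
def junctions_from_cigar_alt (cigartuples : List (Int × Int)) (offset : Int) : List (List Int) :=
  let ops := cigartuples.filter (fun c => c.1 == 0 || c.1 == 2 || c.1 == 3 || c.1 == 7 || c.1 == 8)
  let pos := ops.foldl (fun ps c => ps ++ [(PySem.List.pyGet? ps (-1)).getD 0 + c.2]) [offset]
  let bounds := (ops.zip (pos.zip (PySem.List.slice pos (some 1) none))).filterMap
      (fun x => if x.1.1 == 3 then some (x.2.1, x.2.2) else none)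
  let starts := [offset] ++ bounds.map (fun b => b.2)
  let ends := bounds.map (fun b => b.1) ++ [(PySem.List.pyGet? pos (-1)).getD 0]
  (starts.zip ends).filterMap (fun se => if se.1 ≠ se.2 then some [se.1, se.2] else none)

-- ===== PRECONDITION & SPEC =====
def Spec_junctions_from_cigar (cigartuples : List (Int × Int)) (offset : Int) (out : List (List Int)) : Prop := out = junctions_from_cigar_alt cigartuples offset
instance (cigartuples : List (Int × Int)) (offset : Int) (out : List (List Int)) : Decidable (Spec_junctions_from_cigar cigartuples offset out) := by unfold Spec_junctions_from_cigar; infer_instance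

-- ===== CLAIM =====
def Claim_equal_junctions_from_cigar : Prop := ∀ (cigartuples : List (Int × Int)) (offset : Int), Dom_junctions_from_cigar cigartuples offset → Spec_junctions_from_cigar cigartuples offset (junctions_from_cigar cigartuples offset)

-- ===== LEMMAS AND PROOFS =====

-- Common recursive specification: scalar cursors s (exon start) and e (current position).
def jfcR : List (Int × Int) → Int → Int → List (List Int)
  | [], s, e => if s ≠ e then [[s, e]] else []
  | c :: rest, s, e =>
    if c.1 = 3 then (if s ≠ e then [[s, e]] else []) ++ jfcR rest (e + c.2) (e + c.2)
    else if c.1 = 0 ∨ c.1 = 2 ∨ c.1 = 7 ∨ c.1 = 8 then jfcR rest s (e + c.2)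
    else jfcR rest s e

-- A = R
theorem foldA_R (ct : List (Int × Int)) (acc : List (List Int)) (s e : Int) :
    jfc_trim (ct.foldl jfc_step (acc ++ [[s, e]])) = acc ++ jfcR ct s e := by
  induction ct generalizing acc s e with
  | nil =>
    by_cases h : s = e <;>
      simp [jfc_trim, jfcLast, PySem.List.pyGet?, PySem.List.pyIdx?, jfcR, h]
  | cons c rest ih =>
    simp only [List.foldl_cons]
    by_cases h3 : c.1 = 3
    · by_cases hse : s = e
      · have := ih acc (e + c.2) (e + c.2)
        simp [jfc_step, jfcLast, PySem.List.pyGet?, PySem.List.pyIdx?, h3, hse, jfcR, this]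
      · have := ih (acc ++ [[s, e]]) (e + c.2) (e + c.2)
        simp only [List.append_assoc, List.cons_append, List.nil_append] at this
        simp [jfc_step, jfcLast, PySem.List.pyGet?, PySem.List.pyIdx?, h3, hse, jfcR, this]
    · by_cases hm : c.1 = 0 ∨ c.1 = 2 ∨ c.1 = 7 ∨ c.1 = 8
      · simp [jfc_step, jfcLast, PySem.List.pyGet?, PySem.List.pyIdx?, h3, hm, jfcR, ih]
      · simp [jfc_step, h3, hm, jfcR, ih]

-- Recursive form of B's cumulative-position list.
def posF : List (Int × Int) → Int → List Int
  | [], cur => [cur]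
  | c :: ops, cur => cur :: posF ops (cur + c.2)

theorem posF_cons_shape (ops : List (Int × Int)) (cur : Int) :
    ∃ t, posF ops cur = cur :: t := by
  cases ops <;> simp [posF]

theorem posF_foldl (ops : List (Int × Int)) (cur : Int) :
    ops.foldl (fun ps c => ps ++ [ps.getLast?.getD 0 + c.2]) [cur] = posF ops cur := by
  suffices h : ∀ (ops : List (Int × Int)) (x : Int) (ps : List Int), ps ≠ [] →
      ops.foldl (fun ps c => ps ++ [ps.getLast?.getD 0 + c.2]) (x :: ps)
        = x :: ops.foldl (fun ps c => ps ++ [ps.getLast?.getD 0 + c.2]) ps by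
    induction ops generalizing cur with
    | nil => simp [posF]
    | cons c ops ih =>
      simp only [List.foldl_cons, posF]
      rw [show ([cur] ++ [([cur] : List Int).getLast?.getD 0 + c.2]) = cur :: [cur + c.2] by
        simp, h ops cur [cur + c.2] (by simp), ih]
  intro ops
  induction ops with
  | nil => intro x ps _; rfl
  | cons c ops ih =>
    intro x ps hps
    obtain ⟨q, qs, rfl⟩ := List.exists_cons_of_ne_nil hps
    simp only [List.foldl_cons]
    rw [show (x :: q :: qs ++ [(x :: q :: qs : List Int).getLast?.getD 0 + c.2])
        = x :: (q :: qs ++ [(q :: qs : List Int).getLast?.getD 0 + c.2]) by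
      simp, ih]
    simp

-- B's pipeline, generalized so that the first exon start s0 is independent of the position cursor.
def stagedGen (ct : List (Int × Int)) (s0 cur : Int) : List (List Int) :=
  let ops := ct.filter (fun c => c.1 == 0 || c.1 == 2 || c.1 == 3 || c.1 == 7 || c.1 == 8)
  let pos := posF ops cur
  let bounds := (ops.zip (pos.zip pos.tail)).filterMap
      (fun x => if x.1.1 == 3 then some (x.2.1, x.2.2) else none)
  let starts := [s0] ++ bounds.map (fun b => b.2)
  let ends := bounds.map (fun b => b.1) ++ [(pos.getLast?).getD 0]
  (starts.zip ends).filterMap (fun se => if se.1 ≠ se.2 then some [se.1, se.2] else none)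

theorem alt_staged (ct : List (Int × Int)) (off : Int) :
    junctions_from_cigar_alt ct off = stagedGen ct off off := by
  simp [junctions_from_cigar_alt, stagedGen, PySem.List.pyGet?_neg_one,
    PySem.List.slice_from_one, posF_foldl]

theorem staged_R (ct : List (Int × Int)) (s0 cur : Int) :
    stagedGen ct s0 cur = jfcR ct s0 cur := by
  induction ct generalizing s0 cur with
  | nil => by_cases h : s0 = cur <;> simp [stagedGen, posF, jfcR, h]
  | cons c rest ih =>
    by_cases hk : (c.1 == 0 || c.1 == 2 || c.1 == 3 || c.1 == 7 || c.1 == 8) = true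
    · -- c is kept by the filter
      have hk' : (((c.1 = 0 ∨ c.1 = 2) ∨ c.1 = 3) ∨ c.1 = 7) ∨ c.1 = 8 := by simpa using hk
      obtain ⟨ps, hps⟩ := posF_cons_shape
        (rest.filter (fun c => c.1 == 0 || c.1 == 2 || c.1 == 3 || c.1 == 7 || c.1 == 8)) (cur + c.2)
      by_cases h3 : c.1 = 3
      · -- N op: emit a boundary
        have hih := ih (cur + c.2) (cur + c.2)
        simp only [stagedGen, List.filter_cons, hk, if_pos, posF, hps] at hih ⊢
        by_cases hse : s0 = cur <;>
          simp_all [jfcR, List.zip_cons_cons]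
      · -- M/D/=/X op: advance the cursor
        have hm4 : c.1 = 0 ∨ c.1 = 2 ∨ c.1 = 7 ∨ c.1 = 8 := by tauto
        have hih := ih s0 (cur + c.2)
        simp only [stagedGen, List.filter_cons, hk, if_pos, posF, hps] at hih ⊢
        simp only [jfcR, if_neg h3, if_pos hm4]
        rw [← hih]
        simp [h3, List.zip_cons_cons]
    · -- c dropped by the filter
      have hnm : ¬ (c.1 = 0 ∨ c.1 = 2 ∨ c.1 = 7 ∨ c.1 = 8) := by
        intro h; apply hk; rcases h with h | h | h | h <;> simp [h]
      have h3 : ¬ c.1 = 3 := by intro h; apply hk; simp [h]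
      simp only [stagedGen, List.filter_cons, hk, if_neg, Bool.false_eq_true, not_false_iff,
        jfcR, if_neg h3, if_neg hnm] at *
      exact ih s0 cur

-- ===== VERDICT =====
theorem junctions_from_cigar_spec : Claim_equal_junctions_from_cigar := by
  intro ct offset _
  unfold Spec_junctions_from_cigar junctions_from_cigar
  rw [alt_staged, staged_R]
  have := foldA_R ct [] offset offset
  simpa using this
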